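-- pv_equiv track=rewrite | github.com/pradyun-coder/Python | fiftiethproj.py | investment
-- ===== SOURCE A (Python) =====
-- def investment(prices, diff, i):
--     if i == len(prices):
--         return max(diff), min(diff)
--     b = i
--     while b< len(prices):
--         diff.append(prices[b]-prices[i])
--         b = b +1
--     return investment(prices, diff, i +1)
-- ===== SOURCE B (Python) =====
-- # Single O(n) pass: running min/max of the suffix prefix gives the best/worst
-- # difference per end index; A additionally mutates `diff` in place (appends all
-- # pairwise differences), B does not — the equivalence is about the return value.
-- def investment(prices, diff, i):
--     gains, losses = list(diff), list(diff)
--     lo = hi = None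
--     for p in prices[i:]:
--         lo = p if lo is None else min(lo, p)
--         hi = p if hi is None else max(hi, p)
--         gains.append(p - lo)
--         losses.append(p - hi)
--     return max(gains), min(losses)
-- ===== Notes on version B (the rewrite author's own statement) =====
-- stated objective: faster
-- what changed: Replaced the recursive enumeration of all O(n^2) pairwise differences appended into diff with a single left-to-right pass that keeps the running minimum and maximum of the scanned suffix, so each position contributes only its best and worst difference; note A also mutates diff in place while B leaves it untouched (return values agree).
-- intended difference: For i in {-1, -2}, A's inner loop starts at a negative index and Python's wraparound makes A return extremes over wrap-around differences of the whole list (e.g. A([1,2],[],-1)=(1,-1)), while B reads prices[i:] as the usual suffix and returns its best/worst difference ((0,0) there), the intended meaning of a start index. — e.g. on investment([1, 2], [], -1): A returns (1, -1), B returns (0, 0)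
-- outside the precondition, e.g. on investment([1, 2, 3], [5], -3): A returns (5, -2), B returns (5, 0); on investment([4, 1, 7], [], -3): A returns (6, -6), B returns (6, -3)
import Mathlib
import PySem

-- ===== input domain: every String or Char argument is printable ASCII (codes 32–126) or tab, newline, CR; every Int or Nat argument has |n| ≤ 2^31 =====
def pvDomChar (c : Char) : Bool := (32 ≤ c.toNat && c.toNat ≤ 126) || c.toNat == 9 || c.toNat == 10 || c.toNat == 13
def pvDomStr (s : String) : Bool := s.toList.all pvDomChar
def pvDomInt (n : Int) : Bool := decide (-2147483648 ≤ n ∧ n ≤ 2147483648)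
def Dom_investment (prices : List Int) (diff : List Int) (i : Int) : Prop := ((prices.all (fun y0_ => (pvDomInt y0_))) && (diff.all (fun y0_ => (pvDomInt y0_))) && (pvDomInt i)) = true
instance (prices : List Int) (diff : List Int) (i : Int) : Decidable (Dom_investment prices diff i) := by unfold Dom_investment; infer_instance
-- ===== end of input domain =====

-- ===== PORT A =====
-- B changes: single O(n) pass with running min/max instead of appending all pairwise
-- differences recursively; A also mutates `diff` in place — equivalence is about the return value.
-- fuel-bounded transliteration of A's recursion (fuel only makes it total; inside Pre_ it never runs out)
def investGoA (prices : List Int) : Nat → List Int → Int → Int × Int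
  | 0, _, _ => (0, 0)
  | fuel+1, diff, i =>
    if i = (prices.length : Int) then
      ((PySem.List.max? diff (fun y => y)).getD 0, (PySem.List.min? diff (fun y => y)).getD 0)
    else
      -- while b < len(prices): diff.append(prices[b] - prices[i]); b += 1
      let diff' := (PySem.List.pyRange i (prices.length : Int) 1).foldl
        (fun d b => d ++ [PySem.List.pyGetD prices b 0 - PySem.List.pyGetD prices i 0]) diff
      investGoA prices fuel diff' (i+1)

def investment (prices : List Int) (diff : List Int) (i : Int) : Int × Int :=
  investGoA prices (((prices.length : Int) + 1 - i).toNat) diff i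

-- ===== PORT B =====
def investment_alt (prices : List Int) (diff : List Int) (i : Int) : Int × Int :=
  let st := (PySem.List.slice prices (some i) none).foldl
    (fun (acc : List Int × List Int × Option Int × Option Int) p =>
      let lo' : Int := match acc.2.2.1 with | none => p | some v => min v p
      let hi' : Int := match acc.2.2.2 with | none => p | some v => max v p
      (acc.1 ++ [p - lo'], acc.2.1 ++ [p - hi'], some lo', some hi'))
    (diff, diff, none, none)
  ((PySem.List.max? st.1 (fun y => y)).getD 0, (PySem.List.min? st.2.1 (fun y => y)).getD 0)

-- ===== PRECONDITION & SPEC =====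
-- Pre_ excludes the inputs where A raises — i > len(prices) (unbounded recursion:
-- RecursionError), i < -len(prices) (IndexError), i == len(prices) with diff == []
-- (ValueError from max([])) — and also i < -2, where A still returns but its value is the
-- same negative-index-wraparound artefact that D_ below documents for i in {-1, -2} (the
-- inner loop walks from a negative index across the whole list before re-running from 0).
def Pre_investment (prices : List Int) (diff : List Int) (i : Int) : Prop :=
  -2 ≤ i ∧ -(prices.length : Int) ≤ i ∧ i ≤ (prices.length : Int) ∧ (diff ≠ [] ∨ i < (prices.length : Int))
instance (prices : List Int) (diff : List Int) (i : Int) : Decidable (Pre_investment prices diff i) := by unfold Pre_investment; infer_instance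

def pvWitness_investment : List Int × List Int × Int := ([3, 1, 4], [], 0)

-- For negative i (in range, here i in {-1, -2}), A's inner loop starts at a negative index,
-- so Python's wraparound makes A return the extremes over wrap-around differences of the whole
-- list (before re-running from 0); B reads prices[i:] as the usual suffix and returns its
-- best/worst difference, the intended meaning of a start index.
def D_investment (prices : List Int) (diff : List Int) (i : Int) : Prop := -2 ≤ i ∧ i < 0
instance (prices : List Int) (diff : List Int) (i : Int) : Decidable (D_investment prices diff i) := by unfold D_investment; infer_instance

def Spec_investment (prices : List Int) (diff : List Int) (i : Int) (out : Int × Int) : Prop := ¬ D_investment prices diff i → out = investment_alt prices diff i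
instance (prices : List Int) (diff : List Int) (i : Int) (out : Int × Int) : Decidable (Spec_investment prices diff i out) := by unfold Spec_investment; infer_instance

def pvDiffWitness_investment : List Int × List Int × Int := ([1, 2], [], -1)
def pvDiffWitnessOut_investment : (Int × Int) × (Int × Int) := ((1, -1), (0, 0))

-- ===== CLAIM (what is proved, stated in full; the proofs are below) =====
def Claim_unchanged_investment : Prop := ∀ (prices : List Int) (diff : List Int) (i : Int), Dom_investment prices diff i → Pre_investment prices diff i → Spec_investment prices diff i (investment prices diff i)
def Claim_changed_investment : Prop := Dom_investment (pvDiffWitness_investment.1) (pvDiffWitness_investment.2.1) (pvDiffWitness_investment.2.2) ∧ Pre_investment (pvDiffWitness_investment.1) (pvDiffWitness_investment.2.1) (pvDiffWitness_investment.2.2) ∧ D_investment (pvDiffWitness_investment.1) (pvDiffWitness_investment.2.1) (pvDiffWitness_investment.2.2) ∧ investment (pvDiffWitness_investment.1) (pvDiffWitness_investment.2.1) (pvDiffWitness_investment.2.2) = pvDiffWitnessOut_investment.1 ∧ investment_alt (pvDiffWitness_investment.1) (pvDiffWitness_investment.2.1) (pvDiffWitness_investment.2.2) = pvDiffWitnessOut_investment.2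 ∧ pvDiffWitnessOut_investment.1 ≠ pvDiffWitnessOut_investment.2

-- ===== LEMMAS AND PROOFS =====

-- all pairwise differences s[b] - s[k], k ≤ b, of a list (the blocks A appends)
def pairsL : List Int → List Int
  | [] => []
  | p :: t => (p :: t).map (fun x => x - p) ++ pairsL t

-- B's gain entries after the first element: t[j] - min(lo, t[0..j]) (and the max twin)
def gSeq : Int → List Int → List Int
  | _, [] => []
  | lo, p :: t => (p - min lo p) :: gSeq (min lo p) t

def hSeq : Int → List Int → List Int
  | _, [] => []
  | hi, p :: t => (p - max hi p) :: hSeq (max hi p) t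

-- a running max (resp. min) only depends on the set of values up to mutual domination
theorem foldl_max_eq_of_dom (l1 l2 : List Int)
    (h1 : ∀ x ∈ l1, ∃ y ∈ l2, x ≤ y) (h2 : ∀ y ∈ l2, ∃ x ∈ l1, y ≤ x) (a : Int) :
    l1.foldl max a = l2.foldl max a := by
  apply le_antisymm
  · rcases PySem.List.foldl_max_mem l1 a with h | h
    · rw [h]; exact (PySem.List.le_foldl_max l2 a).1
    · obtain ⟨y, hy, hxy⟩ := h1 _ h
      exact le_trans hxy ((PySem.List.le_foldl_max l2 a).2 y hy)
  · rcases PySem.List.foldl_max_mem l2 a with h | h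
    · rw [h]; exact (PySem.List.le_foldl_max l1 a).1
    · obtain ⟨x, hx, hyx⟩ := h2 _ h
      exact le_trans hyx ((PySem.List.le_foldl_max l1 a).2 x hx)

theorem foldl_min_eq_of_dom (l1 l2 : List Int)
    (h1 : ∀ x ∈ l1, ∃ y ∈ l2, y ≤ x) (h2 : ∀ y ∈ l2, ∃ x ∈ l1, x ≤ y) (a : Int) :
    l1.foldl min a = l2.foldl min a := by
  apply le_antisymm
  · rcases PySem.List.foldl_min_mem l2 a with h | h
    · rw [h]; exact (PySem.List.foldl_min_le l1 a).1
    · obtain ⟨x, hx, hyx⟩ := h2 _ h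
      exact le_trans ((PySem.List.foldl_min_le l1 a).2 x hx) hyx
  · rcases PySem.List.foldl_min_mem l1 a with h | h
    · rw [h]; exact (PySem.List.foldl_min_le l2 a).1
    · obtain ⟨y, hy, hxy⟩ := h1 _ h
      exact le_trans ((PySem.List.foldl_min_le l2 a).2 y hy) hxy

theorem mem_pairsL (s : List Int) (x : Int) :
    x ∈ pairsL s ↔ ∃ k b : Nat, k ≤ b ∧ b < s.length ∧ x = s.getD b 0 - s.getD k 0 := by
  induction s with
  | nil => simp [pairsL]
  | cons p t ih =>
    simp only [pairsL, List.mem_append, List.mem_map, ih]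
    constructor
    · rintro (⟨y, hy, rfl⟩ | ⟨k, b, hkb, hb, rfl⟩)
      · obtain ⟨b, hb, rfl⟩ := List.getElem_of_mem hy
        exact ⟨0, b, Nat.zero_le _, hb, by simp [List.getElem?_eq_getElem hb]⟩
      · exact ⟨k + 1, b + 1, by omega, by simpa using Nat.succ_lt_succ hb, by simp⟩
    · rintro ⟨k, b, hkb, hb, rfl⟩
      match k, b with
      | 0, b =>
        left
        refine ⟨(p :: t).getD b 0, ?_, by simp⟩
        rw [List.getD_eq_getElem _ _ hb]; exact List.getElem_mem _
      | k + 1, b + 1 =>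
        right
        exact ⟨k, b, by omega, by simpa using hb, by simp⟩

theorem mem_gSeq (t : List Int) (lo x : Int) :
    x ∈ gSeq lo t ↔ ∃ j : Nat, j < t.length ∧ x = t.getD j 0 - (t.take (j + 1)).foldl min lo := by
  induction t generalizing lo with
  | nil => simp [gSeq]
  | cons q t ih =>
    simp only [gSeq, List.mem_cons, ih]
    constructor
    · rintro (rfl | ⟨j, hj, rfl⟩)
      · exact ⟨0, by simp, by simp⟩
      · exact ⟨j + 1, by simpa using Nat.succ_lt_succ hj, by simp⟩
    · rintro ⟨j, hj, rfl⟩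
      match j with
      | 0 => left; simp
      | j + 1 => right; exact ⟨j, by simpa using hj, by simp⟩

theorem mem_hSeq (t : List Int) (hi x : Int) :
    x ∈ hSeq hi t ↔ ∃ j : Nat, j < t.length ∧ x = t.getD j 0 - (t.take (j + 1)).foldl max hi := by
  induction t generalizing hi with
  | nil => simp [hSeq]
  | cons q t ih =>
    simp only [hSeq, List.mem_cons, ih]
    constructor
    · rintro (rfl | ⟨j, hj, rfl⟩)
      · exact ⟨0, by simp, by simp⟩
      · exact ⟨j + 1, by simpa using Nat.succ_lt_succ hj, by simp⟩
    · rintro ⟨j, hj, rfl⟩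
      match j with
      | 0 => left; simp
      | j + 1 => right; exact ⟨j, by simpa using hj, by simp⟩

-- every pair is dominated by the gain at its end index
theorem pairs_dom_gains (p : Int) (t : List Int) :
    ∀ x ∈ pairsL (p :: t), ∃ y ∈ (p - p) :: gSeq p t, x ≤ y := by
  intro x hx
  obtain ⟨k, b, hkb, hb, rfl⟩ := (mem_pairsL _ _).1 hx
  match b with
  | 0 =>
    interval_cases k
    exact ⟨p - p, List.mem_cons_self .., by simp⟩
  | j + 1 =>
    have hjt : j < t.length := by simpa using hb
    refine ⟨t.getD j 0 - (t.take (j + 1)).foldl min p, List.mem_cons_of_mem _ ?_, ?_⟩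
    · exact (mem_gSeq t p _).2 ⟨j, hjt, rfl⟩
    · have hget : (p :: t).getD (j + 1) 0 = t.getD j 0 := by simp
      have hle : (t.take (j + 1)).foldl min p ≤ (p :: t).getD k 0 := by
        match k with
        | 0 => simpa using (PySem.List.foldl_min_le (t.take (j + 1)) p).1
        | k + 1 =>
          have hk : k < j + 1 := by omega
          have hkt : k < t.length := by omega
          have hklen : k < (t.take (j + 1)).length := by
            simp [List.length_take]; omega
          have hmem : t.getD k 0 ∈ t.take (j + 1) := by
            have : (t.take (j + 1))[k] = t[k] := List.getElem_take ..
            rw [List.getD_eq_getElem _ _ hkt, ← this]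
            exact List.getElem_mem _
          simpa using (PySem.List.foldl_min_le (t.take (j + 1)) p).2 _ hmem
      rw [hget]; omega

-- every gain is itself one of the pairs
theorem gains_dom_pairs (p : Int) (t : List Int) :
    ∀ y ∈ (p - p) :: gSeq p t, ∃ x ∈ pairsL (p :: t), y ≤ x := by
  intro y hy
  rcases List.mem_cons.1 hy with rfl | hy
  · exact ⟨p - p, by simp [pairsL], le_refl _⟩
  · obtain ⟨j, hj, rfl⟩ := (mem_gSeq t p _).1 hy
    rcases PySem.List.foldl_min_mem (t.take (j + 1)) p with hm | hm
    · refine ⟨t.getD j 0 - p, ?_, by rw [hm]⟩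
      refine (mem_pairsL _ _).2 ⟨0, j + 1, by omega, by simpa using Nat.succ_lt_succ hj, by simp⟩
    · obtain ⟨k, hk, hkeq⟩ := List.getElem_of_mem hm
      have hkj : k < j + 1 := by have := hk; simp [List.length_take] at this; omega
      have hkt : k < t.length := by have := hk; simp [List.length_take] at this; omega
      have hval : t.getD k 0 = (t.take (j + 1)).foldl min p := by
        rw [List.getD_eq_getElem _ _ hkt, ← hkeq]
        exact (List.getElem_take ..).symm
      refine ⟨t.getD j 0 - t.getD k 0, ?_, by rw [hval]⟩
      refine (mem_pairsL _ _).2 ⟨k + 1, j + 1, by omega, by simpa using Nat.succ_lt_succ hj, by simp⟩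

theorem pairs_dom_losses (p : Int) (t : List Int) :
    ∀ x ∈ pairsL (p :: t), ∃ y ∈ (p - p) :: hSeq p t, y ≤ x := by
  intro x hx
  obtain ⟨k, b, hkb, hb, rfl⟩ := (mem_pairsL _ _).1 hx
  match b with
  | 0 =>
    interval_cases k
    exact ⟨p - p, List.mem_cons_self .., by simp⟩
  | j + 1 =>
    have hjt : j < t.length := by simpa using hb
    refine ⟨t.getD j 0 - (t.take (j + 1)).foldl max p, List.mem_cons_of_mem _ ?_, ?_⟩
    · exact (mem_hSeq t p _).2 ⟨j, hjt, rfl⟩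
    · have hget : (p :: t).getD (j + 1) 0 = t.getD j 0 := by simp
      have hle : (p :: t).getD k 0 ≤ (t.take (j + 1)).foldl max p := by
        match k with
        | 0 => simpa using (PySem.List.le_foldl_max (t.take (j + 1)) p).1
        | k + 1 =>
          have hkt : k < t.length := by omega
          have hmem : t.getD k 0 ∈ t.take (j + 1) := by
            have hklen : k < (t.take (j + 1)).length := by
              simp [List.length_take]; omega
            have : (t.take (j + 1))[k] = t[k] := List.getElem_take ..
            rw [List.getD_eq_getElem _ _ hkt, ← this]
            exact List.getElem_mem _
          simpa using (PySem.List.le_foldl_max (t.take (j + 1)) p).2 _ hmem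
      rw [hget]; omega

theorem losses_dom_pairs (p : Int) (t : List Int) :
    ∀ y ∈ (p - p) :: hSeq p t, ∃ x ∈ pairsL (p :: t), x ≤ y := by
  intro y hy
  rcases List.mem_cons.1 hy with rfl | hy
  · exact ⟨p - p, by simp [pairsL], le_refl _⟩
  · obtain ⟨j, hj, rfl⟩ := (mem_hSeq t p _).1 hy
    rcases PySem.List.foldl_max_mem (t.take (j + 1)) p with hm | hm
    · refine ⟨t.getD j 0 - p, ?_, by rw [hm]⟩
      refine (mem_pairsL _ _).2 ⟨0, j + 1, by omega, by simpa using Nat.succ_lt_succ hj, by simp⟩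
    · obtain ⟨k, hk, hkeq⟩ := List.getElem_of_mem hm
      have hkj : k < j + 1 := by have := hk; simp [List.length_take] at this; omega
      have hkt : k < t.length := by have := hk; simp [List.length_take] at this; omega
      have hval : t.getD k 0 = (t.take (j + 1)).foldl max p := by
        rw [List.getD_eq_getElem _ _ hkt, ← hkeq]
        exact (List.getElem_take ..).symm
      refine ⟨t.getD j 0 - t.getD k 0, ?_, by rw [hval]⟩
      refine (mem_pairsL _ _).2 ⟨k + 1, j + 1, by omega, by simpa using Nat.succ_lt_succ hj, by simp⟩

-- max/min over diff ++ (x :: tail) only depends on the tail's running extremum from x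
theorem max_getD_append_cons_eq (diff l1 l2 : List Int) (x : Int)
    (hdom : ∀ a : Int, (x :: l1).foldl max a = (x :: l2).foldl max a) :
    (PySem.List.max? (diff ++ x :: l1) (fun y => y)).getD 0
      = (PySem.List.max? (diff ++ x :: l2) (fun y => y)).getD 0 := by
  match diff with
  | [] =>
    simp only [List.nil_append, PySem.List.max?_id_cons, Option.getD_some]
    have := hdom x
    simpa [max_self] using this
  | d :: dt =>
    simp only [List.cons_append, PySem.List.max?_id_cons, Option.getD_some, List.foldl_append]
    exact hdom _

theorem min_getD_append_cons_eq (diff l1 l2 : List Int) (x : Int)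
    (hdom : ∀ a : Int, (x :: l1).foldl min a = (x :: l2).foldl min a) :
    (PySem.List.min? (diff ++ x :: l1) (fun y => y)).getD 0
      = (PySem.List.min? (diff ++ x :: l2) (fun y => y)).getD 0 := by
  match diff with
  | [] =>
    simp only [List.nil_append, PySem.List.min?_id_cons, Option.getD_some]
    have := hdom x
    simpa [min_self] using this
  | d :: dt =>
    simp only [List.cons_append, PySem.List.min?_id_cons, Option.getD_some, List.foldl_append]
    exact hdom _

-- characterisation of A: the recursion computes max/min of diff ++ all pairs of the suffix
theorem investGoA_char (prices : List Int) :
    ∀ (fuel : Nat) (diff : List Int) (i : Int), 0 ≤ i → i ≤ (prices.length : Int) →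
    ((prices.length : Int) - i).toNat < fuel →
    investGoA prices fuel diff i =
      ((PySem.List.max? (diff ++ pairsL (prices.drop i.toNat)) (fun y => y)).getD 0,
       (PySem.List.min? (diff ++ pairsL (prices.drop i.toNat)) (fun y => y)).getD 0) := by
  intro fuel
  induction fuel with
  | zero => intro diff i h0 h1 h2; omega
  | succ fuel ih =>
    intro diff i h0 h1 h2
    by_cases heq : i = (prices.length : Int)
    · subst heq
      simp [investGoA, pairsL]
    · have hlt : i < (prices.length : Int) := lt_of_le_of_ne h1 heq
      have hit : i.toNat < prices.length := by omega
      have hstep : investGoA prices (fuel + 1) diff i =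
          investGoA prices fuel
            ((PySem.List.pyRange i (prices.length : Int) 1).foldl
              (fun d b => d ++ [PySem.List.pyGetD prices b 0 - PySem.List.pyGetD prices i 0]) diff)
            (i + 1) := by
        simp [investGoA, heq]
      rw [hstep]
      have hc : PySem.List.pyGetD prices i 0 = prices[i.toNat] := by
        conv_lhs => rw [show i = (i.toNat : Int) from (Int.toNat_of_nonneg h0).symm]
        rw [PySem.List.pyGetD_natCast, List.getD_eq_getElem _ _ hit]
      have hmap : (PySem.List.pyRange i (prices.length : Int) 1).map
            (fun b => PySem.List.pyGetD prices b 0) = prices.drop i.toNat :=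
        PySem.List.map_pyGetD_pyRange' prices 0 h0
      have hfold : (PySem.List.pyRange i (prices.length : Int) 1).foldl
            (fun d b => d ++ [PySem.List.pyGetD prices b 0 - PySem.List.pyGetD prices i 0]) diff
          = diff ++ (prices.drop i.toNat).map (fun v => v - prices[i.toNat]) := by
        rw [PySem.List.foldl_append_singleton_eq_map]
        congr 1
        rw [← hmap, List.map_map]
        simp only [Function.comp_def, hc]
      rw [hfold]
      rw [ih _ (i + 1) (by omega) (by omega) (by omega)]
      have hcons : prices.drop i.toNat = prices[i.toNat] :: prices.drop (i.toNat + 1) :=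
        (List.getElem_cons_drop hit).symm
      have hnat : (i + 1).toNat = i.toNat + 1 := by omega
      rw [hnat]
      conv_rhs => rw [hcons]
      simp only [pairsL, List.append_assoc]
      rw [hcons]

-- characterisation of B: the fold accumulates gSeq/hSeq and the running extrema
theorem foldB_invariant (s : List Int) :
    ∀ (g l : List Int) (lo hi : Int),
    s.foldl (fun (acc : List Int × List Int × Option Int × Option Int) p =>
        let lo' : Int := match acc.2.2.1 with | none => p | some v => min v p
        let hi' : Int := match acc.2.2.2 with | none => p | some v => max v p
        (acc.1 ++ [p - lo'], acc.2.1 ++ [p - hi'], some lo', some hi'))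
      (g, l, some lo, some hi)
      = (g ++ gSeq lo s, l ++ hSeq hi s, some (s.foldl min lo), some (s.foldl max hi)) := by
  induction s with
  | nil => intro g l lo hi; simp [gSeq, hSeq]
  | cons p t ih =>
    intro g l lo hi
    simp only [List.foldl_cons]
    rw [ih]
    simp [gSeq, hSeq, List.append_assoc]

theorem foldB_cons (p : Int) (t g l : List Int) :
    (p :: t).foldl (fun (acc : List Int × List Int × Option Int × Option Int) q =>
        let lo' : Int := match acc.2.2.1 with | none => q | some v => min v q
        let hi' : Int := match acc.2.2.2 with | none => q | some v => max v q
        (acc.1 ++ [q - lo'], acc.2.1 ++ [q - hi'], some lo', some hi'))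
      (g, l, none, none)
      = (g ++ (p - p) :: gSeq p t, l ++ (p - p) :: hSeq p t,
         some (t.foldl min p), some (t.foldl max p)) := by
  show t.foldl (fun (acc : List Int × List Int × Option Int × Option Int) q =>
        let lo' : Int := match acc.2.2.1 with | none => q | some v => min v q
        let hi' : Int := match acc.2.2.2 with | none => q | some v => max v q
        (acc.1 ++ [q - lo'], acc.2.1 ++ [q - hi'], some lo', some hi'))
      (g ++ [p - p], l ++ [p - p], some p, some p) = _
  rw [foldB_invariant]
  simp

-- ===== VERDICT (by name: the statement is the Claim_ definition above) =====
theorem investment_spec : Claim_unchanged_investment := by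
  intro prices diff i _hdom hpre hnD
  obtain ⟨_hm, _hm2, h1, _h2⟩ := hpre
  have h0 : 0 ≤ i := by unfold D_investment at hnD; omega
  clear hnD
  rw [investment, investGoA_char prices _ diff i h0 h1 (by omega)]
  rw [investment_alt]
  rw [show PySem.List.slice prices (some i) none = List.drop i.toNat prices from
    PySem.List.slice_from prices h0]
  rcases hd : prices.drop i.toNat with _ | ⟨p, t⟩
  · simp [pairsL]
  · rw [foldB_cons]
    have hpairs : pairsL (p :: t) = (p - p) :: (t.map (fun x => x - p) ++ pairsL t) := by
      simp [pairsL]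
    have hmax := max_getD_append_cons_eq diff (t.map (fun x => x - p) ++ pairsL t) (gSeq p t)
      (p - p) (fun a => by
        rw [← hpairs]
        exact foldl_max_eq_of_dom _ _ (pairs_dom_gains p t) (gains_dom_pairs p t) a)
    have hmin := min_getD_append_cons_eq diff (t.map (fun x => x - p) ++ pairsL t) (hSeq p t)
      (p - p) (fun a => by
        rw [← hpairs]
        exact foldl_min_eq_of_dom _ _ (pairs_dom_losses p t) (losses_dom_pairs p t) a)
    rw [hpairs]
    exact Prod.ext hmax hmin

theorem investment_changed : Claim_changed_investment := by
  unfold Claim_changed_investment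
  decide
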